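-- pv_equiv track=rewrite | github.com/yunusmujadidi/projectxd | drmagen/forwardchaining.py | harussamapersis
-- ===== SOURCE A (Python) =====
-- def harussamapersis(nomor, penyakit, diag):
--     try:
--         nomor = list(nomor)
--     except:
--         nomor = [int(x) for x in str(nomor)]
--     temp_hasil = []
--     for i in range(len(diag)):
--         if i in nomor:
--             temp_hasil.append(diag[i])
--     if temp_hasil.count("y") == len(temp_hasil) == diag.count("y"):
--         return penyakit
-- ===== SOURCE B (Python) =====
-- def harussamapersis(nomor, penyakit, diag):
--     try:
--         nomor = list(nomor)
--     except:
--         nomor = [int(x) for x in str(nomor)]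
--     ypos = {i for i, v in enumerate(diag) if v == "y"}
--     sel = {i for i in range(len(diag)) if i in nomor}
--     if sel == ypos:
--         return penyakit
-- ===== Notes on version B (the rewrite author's own statement) =====
-- stated objective: alternative
-- what changed: B replaces A's collected-values list and double count comparison by two index sets (positions of 'y' vs selected positions) compared for equality.
import Mathlib
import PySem

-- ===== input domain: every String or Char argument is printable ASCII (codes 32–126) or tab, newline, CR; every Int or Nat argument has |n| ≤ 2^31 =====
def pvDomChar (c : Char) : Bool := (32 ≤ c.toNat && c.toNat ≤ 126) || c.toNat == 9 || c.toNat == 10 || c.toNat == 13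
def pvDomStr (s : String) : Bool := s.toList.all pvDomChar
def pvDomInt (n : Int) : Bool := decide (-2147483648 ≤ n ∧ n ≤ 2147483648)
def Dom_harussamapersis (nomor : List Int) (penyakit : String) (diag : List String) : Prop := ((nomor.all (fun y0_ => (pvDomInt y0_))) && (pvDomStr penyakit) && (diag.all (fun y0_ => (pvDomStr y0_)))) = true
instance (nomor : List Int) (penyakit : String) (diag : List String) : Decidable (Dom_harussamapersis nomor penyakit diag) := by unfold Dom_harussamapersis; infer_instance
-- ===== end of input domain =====

-- B compares the set of selected indices with the set of 'y' positions instead of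
-- A's collected-value list with its double count comparison; same cost, a plainer criterion.

-- ===== PORT A =====
-- try: nomor = list(nomor) always succeeds for a list argument, so the except branch is dead here.
def harussamapersis (nomor : List Int) (penyakit : String) (diag : List String) : Option String :=
  let temp_hasil : List String :=
    (PySem.List.pyRange 0 (diag.length : Int) 1).foldl
      (fun acc i => if decide (i ∈ nomor) then acc ++ [PySem.List.pyGetD diag i ""] else acc) []
  -- index i ∈ range(len(diag)) is always valid, so the default "" of diag[i] is never used
  if temp_hasil.count "y" == temp_hasil.length && temp_hasil.length == diag.count "y" then
    some penyakit
  else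
    none

-- ===== PORT B =====
-- Both set comprehensions enumerate indices in increasing order, so the two Python
-- sets (of indices below len(diag)) are equal iff these increasing index lists are equal.
def harussamapersis_alt (nomor : List Int) (penyakit : String) (diag : List String) : Option String :=
  let ypos : List Int :=
    (PySem.List.pyRange 0 (diag.length : Int) 1).filter
      (fun i => PySem.List.pyGetD diag i "" == "y")
  let sel : List Int :=
    (PySem.List.pyRange 0 (diag.length : Int) 1).filter (fun i => decide (i ∈ nomor))
  if sel = ypos then some penyakit else none

-- ===== PRECONDITION & SPEC =====
def Spec_harussamapersis (nomor : List Int) (penyakit : String) (diag : List String) (out : Option String) : Prop := out = harussamapersis_alt nomor penyakit diag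
instance (nomor : List Int) (penyakit : String) (diag : List String) (out : Option String) : Decidable (Spec_harussamapersis nomor penyakit diag out) := by unfold Spec_harussamapersis; infer_instance

-- ===== CLAIM (what is proved, stated in full; the proofs are below) =====
def Claim_equal_harussamapersis : Prop := ∀ (nomor : List Int) (penyakit : String) (diag : List String), Dom_harussamapersis nomor penyakit diag → Spec_harussamapersis nomor penyakit diag (harussamapersis nomor penyakit diag)

-- ===== LEMMAS AND PROOFS =====

-- A's accumulation loop is map-over-filter.
theorem foldl_if_append (p : Int → Bool) (f : Int → String) :
    ∀ (L : List Int) (acc : List String),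
      L.foldl (fun acc i => if p i then acc ++ [f i] else acc) acc
        = acc ++ (L.filter p).map f := by
  intro L
  induction L with
  | nil => simp
  | cons x xs ih =>
      intro acc
      by_cases h : p x = true <;> simp [List.foldl_cons, h, ih]

theorem sublist_filter_eq_of_length {q : Int → Bool} {S L : List Int}
    (hS : S.Sublist L) (hall : ∀ x ∈ S, q x = true)
    (hlen : S.length = (L.filter q).length) : S = L.filter q := by
  have h1 : S.filter q = S := List.filter_eq_self.mpr hall
  have h2 : (S.filter q).Sublist (L.filter q) := hS.filter q
  rw [h1] at h2
  exact h2.eq_of_length hlen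

-- A's two count equalities agree with B's set criterion.
theorem counts_iff_filter_eq (p q : Int → Bool) (L : List Int) :
    ((L.filter p).countP q = (L.filter p).length ∧
      (L.filter p).length = (L.filter q).length) ↔ L.filter p = L.filter q := by
  constructor
  · rintro ⟨hc, hl⟩
    exact sublist_filter_eq_of_length L.filter_sublist (List.countP_eq_length.mp hc) hl
  · intro h
    refine ⟨?_, by rw [h]⟩
    apply List.countP_eq_length.mpr
    intro x hx
    rw [h] at hx
    exact List.of_mem_filter hx

theorem count_map_eq (S : List Int) (diag : List String) :
    ((S.map (fun i => PySem.List.pyGetD diag i "")).count "y")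
      = S.countP (fun i => PySem.List.pyGetD diag i "" == "y") := by
  simp [List.count, List.countP_map, Function.comp_def]

theorem dcount_eq (diag : List String) :
    diag.count "y"
      = ((PySem.List.pyRange 0 (diag.length : Int) 1).filter
          (fun i => PySem.List.pyGetD diag i "" == "y")).length := by
  conv_lhs => rw [← PySem.List.map_pyGetD_pyRange_zero' diag ""]
  rw [count_map_eq, List.countP_eq_length_filter]

-- ===== VERDICT (by name: the statement is the Claim_ definition above) =====
theorem harussamapersis_spec : Claim_equal_harussamapersis := by
  intro nomor penyakit diag _
  unfold Spec_harussamapersis harussamapersis harussamapersis_alt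
  have htemp := foldl_if_append (fun i => decide (i ∈ nomor))
      (fun i => PySem.List.pyGetD diag i "")
      (PySem.List.pyRange 0 (diag.length : Int) 1) []
  rw [List.nil_append] at htemp
  have key := counts_iff_filter_eq (fun i => decide (i ∈ nomor))
      (fun i => PySem.List.pyGetD diag i "" == "y")
      (PySem.List.pyRange 0 (diag.length : Int) 1)
  simp only [htemp, count_map_eq, List.length_map]
  rw [dcount_eq diag]
  by_cases h : (PySem.List.pyRange 0 (diag.length : Int) 1).filter (fun i => decide (i ∈ nomor))
      = (PySem.List.pyRange 0 (diag.length : Int) 1).filter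
          (fun i => PySem.List.pyGetD diag i "" == "y")
  · rw [if_pos h, if_pos]
    simp only [Bool.and_eq_true, beq_iff_eq]
    exact key.mpr h
  · rw [if_neg h, if_neg]
    simp only [Bool.and_eq_true, beq_iff_eq]
    exact fun hc => h (key.mp ⟨hc.1, hc.2⟩)
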